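-- pv_equiv track=rewrite | github.com/meezlung/git-test | lab10/prac/lab10b.py | ways_to_repair
-- ===== SOURCE A (Python) =====
-- def ways_to_repair(n: int, k: int) -> int:
--     MOD = 998_244_353
--     if k == 0:
--         return 0
--
--     # 1) build the 8 L-shapes as (s_mask, n_mask) on a 3×2 block
--     base = {
--         0: [(0,0),(1,0),(1,1)],
--         1: [(0,0),(0,1),(1,1)],
--         2: [(0,1),(1,0),(1,1)],
--         3: [(0,0),(0,1),(1,0)]
--     }
--     shapes = []
--     for cells in base.values():
--         for vs in (0,1):
--             sm = nm = 0
--             for (r,c) in cells: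
--                 rr = r + vs
--                 if c == 0:
--                     sm |= 1 << rr
--                 else:
--                     nm |= 1 << rr
--             shapes.append((sm, nm))
--
--     # 2) build M[next_mask][cur_mask] = poly of length k+1
--     def build_M():
--         M = [[[0]*(k+1) for _ in range(8)] for _ in range(8)]
--         for cur in range(8):
--             # try every subset of the 8 shapes (2^8=256 subsets)
--             for mask in range(1<<8):
--                 d = mask.bit_count()
--                 if d > k:
--                     continue
--                 s_union = n_union = 0
--                 ok = True
--                 for i in range(8):
--                     if (mask>>i)&1:
--                         s,n = shapes[i]
--                         # no overlap with cur, nor among themselves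
--                         if (s & cur) or (s & s_union) or (n & n_union):
--                             ok = False
--                             break
--                         s_union |= s
--                         n_union |= n
--                 if not ok:
--                     continue
--                 M[n_union][cur][d] += 1
--         return M
--
--     M = build_M()
--
--     # 3) poly-matrix multiply / pow
--     def mat_mul(A, B):
--         C = [[[0]*(k+1) for _ in range(8)] for _ in range(8)]
--         for i in range(8):
--             for j in range(8):
--                 acc = [0]*(k+1)
--                 for t in range(8):
--                     a = A[i][t]
--                     b = B[t][j]
--                     for da in range(len(a)):
--                         if a[da]:
--                             va = a[da]
--                             for db in range(k+1-da):
--                                 if b[db]: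
--                                     acc[da+db] = (acc[da+db] + va * b[db]) % MOD
--                 C[i][j] = acc
--         return C
--
--     def mat_pow(X, e):
--         # identity
--         I = [[[0]*(k+1) for _ in range(8)] for _ in range(8)]
--         for i in range(8):
--             I[i][i][0] = 1
--         R = I
--         while e:
--             if e & 1:
--                 R = mat_mul(R, X)
--             X = mat_mul(X, X)
--             e >>= 1
--         return R
--
--     # 4) raise M to the n-th power, apply to g^(0) = e₀
--     P = mat_pow(M, n)
--     # g^(n)[mask] = P[mask][0]  (since g^(0) is 1 at mask=0, 0 elsewhere)
--     poly_end = P[0][0]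
--
--     # 5) sum coefficients z^1..z^k
--     return sum(poly_end[1:]) % MOD
-- ===== SOURCE B (Python) =====
-- def ways_to_repair(n: int, k: int) -> int:
--     MOD = 998_244_353
--
--     # 1) the 8 L-shapes and the transfer matrix M, kept verbatim from the original
--     base = {
--         0: [(0,0),(1,0),(1,1)],
--         1: [(0,0),(0,1),(1,1)],
--         2: [(0,1),(1,0),(1,1)],
--         3: [(0,0),(0,1),(1,0)]
--     }
--     shapes = []
--     for cells in base.values():
--         for vs in (0,1):
--             sm = nm = 0
--             for (r,c) in cells:
--                 rr = r + vs
--                 if c == 0: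
--                     sm |= 1 << rr
--                 else:
--                     nm |= 1 << rr
--             shapes.append((sm, nm))
--
--     M = [[[0]*(k+1) for _ in range(8)] for _ in range(8)]
--     for cur in range(8):
--         for mask in range(1<<8):
--             d = mask.bit_count()
--             if d > k:
--                 continue
--             s_union = n_union = 0
--             ok = True
--             for i in range(8):
--                 if (mask>>i)&1:
--                     s, nn = shapes[i]
--                     if (s & cur) or (s & s_union) or (nn & n_union):
--                         ok = False
--                         break
--                     s_union |= s
--                     n_union |= nn
--             if not ok:
--                 continue
--             M[n_union][cur][d] += 1
--
--     # 2) functional truncated polynomial arithmetic: the product built by whole-tail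
--     #    slice updates, one per nonzero coefficient of the left factor (no in-place accumulator, no zero skipping)
--     def poly_mul(a, b):
--         out = [0] * (k + 1)
--         for i in range(len(a)):
--             if a[i]:
--                 out[i:] = [x + a[i] * y for x, y in zip(out[i:], b)]
--         return [x % MOD for x in out]
--
--     def poly_add(a, b):
--         return [(x + y) % MOD for x, y in zip(a, b)]
--
--     def mat_sq(X):
--         C = []
--         for i in range(8):
--             row = []
--             for j in range(8):
--                 acc = [0] * (k + 1)
--                 for t in range(8):
--                     acc = poly_add(acc, poly_mul(X[i][t], X[t][j]))
--                 row.append(acc)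
--             C.append(row)
--         return C
--
--     def vec_apply(X, w):
--         u = []
--         for i in range(8):
--             acc = [0] * (k + 1)
--             for t in range(8):
--                 acc = poly_add(acc, poly_mul(X[i][t], w[t]))
--             u.append(acc)
--         return u
--
--     # 3) no matrix power M^n is ever formed: recurse over the binary expansion
--     #    of n, folding the squarings of M directly into the DP vector
--     def apply_pow(X, e, w):
--         if e <= 0:
--             return w
--         if e & 1:
--             w = vec_apply(X, w)
--         return apply_pow(mat_sq(X), e >> 1, w)
--
--     w0 = [[1 if i == 0 and d == 0 else 0 for d in range(k + 1)] for i in range(8)]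
--     wn = apply_pow(M, n, w0)
--
--     # 4) sum coefficients z^1..z^k
--     return sum(wn[0][1:]) % MOD
-- ===== Notes on version B (the rewrite author's own statement) =====
-- stated objective: alternative
-- what changed: B keeps the shape/M construction verbatim but replaces A's whole solver: the in-place per-cell scatter convolution and the matrix-power accumulation (identity matrix, R = R*X matrix-matrix products) are gone; B uses functional truncated-polynomial ops (products built by whole-tail slice updates with a final mod pass, sums as zip comprehensions) and a recursive binary powering that folds the squarings of M straight into the length-8 DP vector, never forming M^n.
import Mathlib
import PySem

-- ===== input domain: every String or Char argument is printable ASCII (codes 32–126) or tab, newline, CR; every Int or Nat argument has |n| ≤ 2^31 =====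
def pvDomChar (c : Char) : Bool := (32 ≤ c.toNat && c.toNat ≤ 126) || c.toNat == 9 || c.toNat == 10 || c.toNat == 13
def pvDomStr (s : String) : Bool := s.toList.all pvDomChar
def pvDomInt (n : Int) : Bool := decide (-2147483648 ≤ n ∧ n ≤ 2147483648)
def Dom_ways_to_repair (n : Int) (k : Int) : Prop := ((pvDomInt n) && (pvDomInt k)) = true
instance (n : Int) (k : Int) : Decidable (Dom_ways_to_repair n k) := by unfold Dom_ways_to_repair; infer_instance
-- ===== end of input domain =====

-- B keeps the shape/M construction verbatim but replaces the whole solver: functional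
-- per-degree polynomial arithmetic and a recursive binary powering folding the squarings
-- of M into the DP vector, never forming M^n; objective: alternative (same asymptotic cost).

-- ===== PORT A =====
-- 8×8 matrices of polynomials, exactly as Python's nested lists
abbrev PMat : Type := List (List (List Int))

def pvMEntry (M : PMat) (i j : Nat) : List Int := (M.getD i []).getD j []

-- shared by both programs verbatim: the 8 L-shapes as (s_mask, n_mask)
def pvShapes : List (Nat × Nat) :=
  let baseVals : List (List (Nat × Nat)) :=
    [[(0,0),(1,0),(1,1)], [(0,0),(0,1),(1,1)], [(0,1),(1,0),(1,1)], [(0,0),(0,1),(1,0)]]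
  baseVals.foldl (fun shapes cells =>
    [0,1].foldl (fun shapes vs =>
      let p := cells.foldl (fun (p : Nat × Nat) rc =>
          let rr := rc.1 + vs
          if rc.2 = 0 then (p.1 ||| (1 <<< rr), p.2) else (p.1, p.2 ||| (1 <<< rr)))
        (0, 0)
      shapes ++ [p]) shapes) []

-- shared by both programs verbatim: build_M
def pvBuildM (k : Int) : PMat :=
  (List.range 8).foldl (fun M cur =>
    (List.range 256).foldl (fun M (mask : Nat) =>
      let d := PySem.Int.bitCount (mask : Int)
      if (d : Int) > k then M
      else
        let st := (List.range 8).foldl (fun (st : Nat × Nat × Bool) (i : Nat) =>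
            if st.2.2 = false then st  -- Python's `break`: remaining iterations do nothing
            else if ((mask >>> i) &&& 1 : Nat) = 1 then
              let s := (pvShapes.getD i (0, 0)).1
              let nn := (pvShapes.getD i (0, 0)).2
              if s &&& cur ≠ 0 ∨ s &&& st.1 ≠ 0 ∨ nn &&& st.2.1 ≠ 0 then
                (st.1, st.2.1, false)
              else (st.1 ||| s, st.2.1 ||| nn, st.2.2)
            else st) (0, 0, true)
        if st.2.2 = false then M
        else
          let nu := st.2.1
          M.set nu ((M.getD nu []).set cur
            (((M.getD nu []).getD cur []).set d
              ((((M.getD nu []).getD cur []).getD d 0) + 1)))) M)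
    (List.replicate 8 (List.replicate 8 (List.replicate (k+1).toNat 0)))

-- the  `for db in range(k+1-da): …`  inner loop of A's mat_mul
def pvInner (k : Int) (b : List Int) (va : Int) (da : Nat) (acc : List Int) : List Int :=
  (List.range (k + 1 - (da : Int)).toNat).foldl (fun acc db =>
    let vb := b.getD db 0
    if vb ≠ 0 then
      acc.set (da + db) (PySem.Int.mod (acc.getD (da + db) 0 + va * vb) 998244353)
    else acc) acc

-- the  `for da in range(len(a)): …`  loop of A's mat_mul
def pvAccConv (k : Int) (a b acc : List Int) : List Int :=
  (List.range a.length).foldl (fun acc da =>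
    let va := a.getD da 0
    if va ≠ 0 then pvInner k b va da acc else acc) acc

def pvMatMul (k : Int) (A B : PMat) : PMat :=
  (List.range 8).map (fun i => (List.range 8).map (fun j =>
    (List.range 8).foldl (fun acc t => pvAccConv k (pvMEntry A i t) (pvMEntry B t j) acc)
      (List.replicate (k+1).toNat 0)))

-- mat_pow's identity matrix:  I[i][i][0] = 1
def pvIdMat (k : Int) : PMat :=
  (List.range 8).foldl (fun I i =>
    I.set i ((I.getD i []).set i (((I.getD i []).getD i []).set 0 1)))
    (List.replicate 8 (List.replicate 8 (List.replicate (k+1).toNat 0)))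

-- mat_pow's  `while e:`  loop (A diverges for e < 0; such n are outside Pre_)
def pvMatPowGo (k : Int) (X : PMat) (e : Int) (R : PMat) : PMat :=
  if h : 0 < e then
    let R' := if e % 2 = 1 then pvMatMul k R X else R
    pvMatPowGo k (pvMatMul k X X) (e / 2) R'
  else R
termination_by e.toNat
decreasing_by omega

def ways_to_repair (n : Int) (k : Int) : Int :=
  if k = 0 then 0
  else
    let M := pvBuildM k
    let P := pvMatPowGo k M n (pvIdMat k)
    PySem.Int.mod ((pvMEntry P 0 0).drop 1).sum 998244353

-- ===== PORT B =====
-- Source B's poly_mul: the truncated product built by whole-tail slice updates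
-- (out[i:] = [x + a[i]*y for x,y in zip(out[i:], b)], a final mod pass); the slice
-- assignment is ported as take ++ zipWith (zip truncates at the shorter list)
def pvPolyMul (k : Int) (a b : List Int) : List Int :=
  ((List.range a.length).foldl (fun out i =>
    if a.getD i 0 ≠ 0 then
      out.take i ++ List.zipWith (fun x y => x + a.getD i 0 * y) (out.drop i) b
    else out) (List.replicate (k+1).toNat 0)).map (fun x => PySem.Int.mod x 998244353)

-- Source B's poly_add: coefficientwise sum mod p over zip (zip truncates at the shorter list)
def pvPolyAdd (a b : List Int) : List Int :=
  List.zipWith (fun x y => PySem.Int.mod (x + y) 998244353) a b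

def pvMatSqB (k : Int) (X : PMat) : PMat :=
  (List.range 8).map (fun i => (List.range 8).map (fun j =>
    (List.range 8).foldl (fun acc t => pvPolyAdd acc (pvPolyMul k (pvMEntry X i t) (pvMEntry X t j)))
      (List.replicate (k+1).toNat 0)))

def pvVecApply (k : Int) (X : PMat) (w : List (List Int)) : List (List Int) :=
  (List.range 8).map (fun i =>
    (List.range 8).foldl (fun acc t => pvPolyAdd acc (pvPolyMul k (pvMEntry X i t) (w.getD t [])))
      (List.replicate (k+1).toNat 0))

-- Source B's recursive apply_pow (returns w unchanged once e ≤ 0)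
def pvApplyPow (k : Int) (X : PMat) (e : Int) (w : List (List Int)) : List (List Int) :=
  if h : 0 < e then
    let w' := if e % 2 = 1 then pvVecApply k X w else w
    pvApplyPow k (pvMatSqB k X) (e / 2) w'
  else w
termination_by e.toNat
decreasing_by omega

def ways_to_repair_alt (n : Int) (k : Int) : Int :=
  let M := pvBuildM k   -- shape building and M construction are shared verbatim with A
  let w0 : List (List Int) := (List.range 8).map (fun i =>
    (List.range (k+1).toNat).map (fun d => if i = 0 ∧ d = 0 then (1 : Int) else 0))
  let wn := pvApplyPow k M n w0
  PySem.Int.mod ((wn.getD 0 []).drop 1).sum 998244353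

-- ===== PRECONDITION & SPEC =====
-- Pre_ excludes n < 0 (A's `while e:` never terminates there) and k < 0 (A's
-- `I[i][i][0] = 1` raises IndexError on the then-empty polynomial lists).
def Pre_ways_to_repair (n : Int) (k : Int) : Prop := 0 ≤ n ∧ 0 ≤ k
instance (n : Int) (k : Int) : Decidable (Pre_ways_to_repair n k) := by
  unfold Pre_ways_to_repair; infer_instance
def pvWitness_ways_to_repair : Int × Int := (3, 2)

def Spec_ways_to_repair (n : Int) (k : Int) (out : Int) : Prop := out = ways_to_repair_alt n k
instance (n : Int) (k : Int) (out : Int) : Decidable (Spec_ways_to_repair n k out) := by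
  unfold Spec_ways_to_repair; infer_instance

-- ===== CLAIM (what is proved, stated in full; the proofs are below) =====
def Claim_equal_ways_to_repair : Prop := ∀ (n : Int) (k : Int), Dom_ways_to_repair n k →
  Pre_ways_to_repair n k → Spec_ways_to_repair n k (ways_to_repair n k)

-- ===== LEMMAS AND PROOFS =====
abbrev Zm : Type := ZMod 998244353
abbrev PS : Type := PowerSeries Zm
abbrev AMat : Type := Matrix (Fin 8) (Fin 8) PS

def castD (x : List Int) (d : Nat) : Zm := ((x.getD d 0 : Int) : Zm)

lemma cast_emod (x : Int) : ((x % (998244353:Int) : Int) : Zm) = (x : Zm) := by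
  have h2 : ((998244353:Zm)) = 0 := by decide
  rw [Int.emod_def]
  push_cast
  rw [h2]; ring

-- a : List Int approximates the coefficient function φ up to degree K, coefficientwise mod 998244353
def CApprox (K : Nat) (a : List Int) (φ : Nat → Zm) : Prop :=
  a.length = K + 1 ∧ ∀ d, d ≤ K → castD a d = φ d

def PRel (K : Nat) (a : List Int) (f : PS) : Prop :=
  CApprox K a (fun d => PowerSeries.coeff (R := Zm) d f)

def PRelM (K : Nat) (X : PMat) (F : AMat) : Prop :=
  ∀ i j : Fin 8, PRel K (pvMEntry X i.val j.val) (F i j)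

def PRelV (K : Nat) (g : List (List Int)) (v : Fin 8 → PS) : Prop :=
  ∀ i : Fin 8, PRel K (g.getD i.val []) (v i)

lemma cast_pymod (x : Int) : ((PySem.Int.mod x 998244353 : Int) : Zm) = (x : Zm) := by
  rw [PySem.Int.mod_eq_emod_of_pos (by norm_num)]
  exact cast_emod x

lemma pymod_congr (x y : Int) (h : (x : Zm) = (y : Zm)) :
    PySem.Int.mod x 998244353 = PySem.Int.mod y 998244353 := by
  rw [PySem.Int.mod_eq_emod_of_pos (by norm_num), PySem.Int.mod_eq_emod_of_pos (by norm_num)]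
  rw [ZMod.intCast_eq_intCast_iff] at h
  exact h

lemma capprox_congr {K a φ ψ} (h : CApprox K a φ) (he : ∀ d, d ≤ K → φ d = ψ d) :
    CApprox K a ψ := by
  exact ⟨h.1, fun d hd => (h.2 d hd).trans (he d hd)⟩

lemma capprox_zero (K : Nat) : CApprox K (List.replicate (K+1) 0) (fun _ => 0) := by
  refine ⟨List.length_replicate, fun d hd => ?_⟩
  simp [castD, List.getD]

lemma rel_zero (K : Nat) : PRel K (List.replicate (K+1) 0) (0 : PS) := by
  refine ⟨List.length_replicate, fun d hd => ?_⟩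
  simp [castD, List.getD]

lemma rel_e0 (K : Nat) : PRel K ((List.replicate (K+1) (0 : Int)).set 0 1) (1 : PS) := by
  refine ⟨by simp, fun d hd => ?_⟩
  rcases d with _ | d
  · simp [castD, List.getD_eq_getElem?_getD]
  · simp [castD, List.getD_eq_getElem?_getD, PowerSeries.coeff_one]

lemma capprox_set {K acc φ} (h : CApprox K acc φ) (idx : Nat) (hidx : idx ≤ K) (v : Int) :
    CApprox K (acc.set idx (PySem.Int.mod (acc.getD idx 0 + v) 998244353))
      (fun d => if d = idx then φ d + (v : Zm) else φ d) := by
  obtain ⟨hlen, hco⟩ := h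
  have hidx' : idx < acc.length := by omega
  refine ⟨by simp [hlen], fun d hd => ?_⟩
  by_cases hdi : d = idx
  · subst hdi
    simp only [castD, List.getD_eq_getElem?_getD, List.getElem?_set_self hidx', Option.getD_some]
    rw [cast_pymod]
    push_cast
    have := hco d hd
    simp only [castD, List.getD_eq_getElem?_getD] at this
    rw [this]
  · simp only [castD, List.getD_eq_getElem?_getD, List.getElem?_set_ne (fun h => hdi h.symm),
      if_neg hdi]
    rw [← List.getD_eq_getElem?_getD]
    exact hco d hd

lemma inner_spec {K : Nat} (b : List Int) (va : Int) (da : Nat) :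
    ∀ (m : Nat), da + m ≤ K + 1 → ∀ acc φ, CApprox K acc φ →
    CApprox K ((List.range m).foldl (fun acc db =>
        let vb := b.getD db 0
        if vb ≠ 0 then
          acc.set (da + db) (PySem.Int.mod (acc.getD (da + db) 0 + va * vb) 998244353)
        else acc) acc)
      (fun d => if da ≤ d ∧ d < da + m then φ d + (va : Zm) * castD b (d - da) else φ d) := by
  intro m
  induction m with
  | zero =>
    intro hm acc φ hacc
    simp only [List.range_zero, List.foldl_nil]
    exact capprox_congr hacc (fun d hd => by rw [if_neg (by omega)])
  | succ m ih =>
    intro hm acc φ hacc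
    rw [List.range_succ, List.foldl_append, List.foldl_cons, List.foldl_nil]
    have h1 := ih (by omega) acc φ hacc
    simp only []
    by_cases hb : b.getD m 0 = 0
    · rw [hb]
      simp only [ne_eq, not_true_eq_false, if_false]
      refine capprox_congr h1 (fun d hd => ?_)
      by_cases hcond : da ≤ d ∧ d < da + m
      · rw [if_pos hcond, if_pos (by omega)]
      · by_cases hdm : d = da + m
        · subst hdm
          rw [if_neg hcond, if_pos (by omega)]
          have : da + m - da = m := by omega
          rw [this]
          simp only [List.getD_eq_getElem?_getD] at hb
          simp [castD, List.getD_eq_getElem?_getD, hb]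
        · rw [if_neg hcond, if_neg (by omega)]
    · rw [if_pos hb]
      have h2 := capprox_set h1 (da + m) (by omega) (va * b.getD m 0)
      refine capprox_congr h2 (fun d hd => ?_)
      by_cases hdm : d = da + m
      · subst hdm
        rw [if_pos rfl, if_neg (by omega), if_pos (by omega)]
        have : da + m - da = m := by omega
        rw [this]
        simp only [castD]
        push_cast
        ring
      · rw [if_neg hdm]
        by_cases hcond : da ≤ d ∧ d < da + m
        · rw [if_pos hcond, if_pos (by omega)]
        · rw [if_neg hcond, if_neg (by omega)]

lemma accconv_capprox {K : Nat} {k : Int} (hk : k = (K : Int)) (a b acc : List Int)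
    (φ : Nat → Zm) (ha : a.length = K + 1) (hacc : CApprox K acc φ) :
    CApprox K (pvAccConv k a b acc)
      (fun d => φ d + ∑ i ∈ Finset.range (min (K+1) (d+1)), castD a i * castD b (d - i)) := by
  have main : ∀ m, m ≤ K + 1 →
      CApprox K ((List.range m).foldl (fun acc da =>
          let va := a.getD da 0
          if va ≠ 0 then pvInner k b va da acc else acc) acc)
        (fun d => φ d + ∑ i ∈ Finset.range (min m (d+1)), castD a i * castD b (d - i)) := by
    intro m
    induction m with
    | zero =>
      intro hm
      simp only [List.range_zero, List.foldl_nil]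
      exact capprox_congr hacc (fun d hd => by simp)
    | succ m ih =>
      intro hm
      rw [List.range_succ, List.foldl_append, List.foldl_cons, List.foldl_nil]
      have h1 := ih (by omega)
      simp only []
      by_cases hva : a.getD m 0 = 0
      · rw [hva]
        simp only [ne_eq, not_true_eq_false, if_false]
        refine capprox_congr h1 (fun d hd => ?_)
        by_cases hmd : m ≤ d
        · have e1 : min m (d+1) = m := by omega
          have e2 : min (m+1) (d+1) = m + 1 := by omega
          rw [e1, e2, Finset.sum_range_succ]
          have : castD a m = 0 := by
            simp only [List.getD_eq_getElem?_getD] at hva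
            simp [castD, List.getD_eq_getElem?_getD, hva]
          rw [this, zero_mul, add_zero]
        · have : min (m+1) (d+1) = min m (d+1) := by omega
          rw [this]
      · rw [if_pos hva]
        have hcnt : (k + 1 - (m : Int)).toNat = K + 1 - m := by omega
        rw [pvInner, hcnt]
        have h2 := inner_spec (K := K) b (a.getD m 0) m (K + 1 - m) (by omega) _ _ h1
        refine capprox_congr h2 (fun d hd => ?_)
        by_cases hmd : m ≤ d
        · rw [if_pos (by omega)]
          have e1 : min m (d+1) = m := by omega
          have e2 : min (m+1) (d+1) = m + 1 := by omega
          rw [e1, e2, Finset.sum_range_succ]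
          simp only [castD]
          ring
        · rw [if_neg (by omega)]
          have : min (m+1) (d+1) = min m (d+1) := by omega
          rw [this]
  rw [pvAccConv, ha]
  exact main (K+1) le_rfl

lemma accconv_rel {K : Nat} {k : Int} (hk : k = (K : Int)) {a b acc : List Int}
    {f g : PS} {φ : Nat → Zm} (hf : PRel K a f) (hg : PRel K b g) (hacc : CApprox K acc φ) :
    CApprox K (pvAccConv k a b acc) (fun d => φ d + PowerSeries.coeff (R := Zm) d (f * g)) := by
  have h1 := accconv_capprox hk a b acc φ hf.1 hacc
  refine capprox_congr h1 (fun d hd => ?_)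
  have e1 : min (K+1) (d+1) = d + 1 := by omega
  rw [e1, PowerSeries.coeff_mul, Finset.Nat.sum_antidiagonal_eq_sum_range_succ_mk]
  congr 1
  apply Finset.sum_congr rfl
  intro i hi
  simp only [Finset.mem_range] at hi
  rw [hf.2 i (by omega), hg.2 (d - i) (by omega)]

lemma matmul_rel {K : Nat} {k : Int} (hk : k = (K : Int)) {X Y : PMat} {F G : AMat}
    (hX : PRelM K X F) (hY : PRelM K Y G) : PRelM K (pvMatMul k X Y) (F * G) := by
  have hK1 : (k+1).toNat = K + 1 := by omega
  have aux : ∀ (i j : Fin 8) (l : List (Fin 8)) (acc : List Int) (φ : Nat → Zm),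
      CApprox K acc φ →
      CApprox K (l.foldl (fun acc t => pvAccConv k (pvMEntry X i.val t.val) (pvMEntry Y t.val j.val) acc) acc)
        (fun d => φ d + ((l.map (fun t => PowerSeries.coeff (R := Zm) d (F i t * G t j))).sum)) := by
    intro i j l
    induction l with
    | nil => intro acc φ hacc; exact capprox_congr hacc (fun d hd => by simp)
    | cons t l ih =>
      intro acc φ hacc
      rw [List.foldl_cons]
      have h1 := accconv_rel hk (hX i t) (hY t j) hacc
      have h2 := ih _ _ h1
      refine capprox_congr h2 (fun d hd => ?_)
      simp only [List.map_cons, List.sum_cons]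
      ring
  intro i j
  have hrange : List.range 8 = (List.finRange 8).map Fin.val := by decide
  have hentry : pvMEntry (pvMatMul k X Y) i.val j.val =
      (List.finRange 8).foldl (fun acc t => pvAccConv k (pvMEntry X i.val t.val) (pvMEntry Y t.val j.val) acc)
        (List.replicate (k+1).toNat 0) := by
    rw [pvMatMul]
    unfold pvMEntry
    rw [PySem.List.getD_map_range _ 8 i.val _ i.isLt, PySem.List.getD_map_range _ 8 j.val _ j.isLt]
    rw [hrange, List.foldl_map]
  rw [hentry]
  have h0 : CApprox K (List.replicate (k+1).toNat 0) (fun _ => 0) := by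
    rw [hK1]; exact capprox_zero K
  have := aux i j (List.finRange 8) _ _ h0
  refine capprox_congr this (fun d hd => ?_)
  rw [zero_add, ← Fin.sum_univ_def, Matrix.mul_apply, map_sum]

lemma idmat_entry (k : Int) (i j : Fin 8) :
    pvMEntry (pvIdMat k) i.val j.val =
      if i = j then (List.replicate (k+1).toNat (0:Int)).set 0 1
      else List.replicate (k+1).toNat 0 := by
  have h8 : List.range 8 = [0,1,2,3,4,5,6,7] := by decide
  rw [pvIdMat, h8]
  fin_cases i <;> fin_cases j <;> rfl

lemma idmat_rel {K : Nat} {k : Int} (hk : k = (K : Int)) : PRelM K (pvIdMat k) (1 : AMat) := by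
  have hK1 : (k+1).toNat = K + 1 := by omega
  intro i j
  rw [idmat_entry, hK1, Matrix.one_apply]
  by_cases hij : i = j
  · rw [if_pos hij, if_pos hij]; exact rel_e0 K
  · rw [if_neg hij, if_neg hij]; exact rel_zero K

lemma matpow_rel {K : Nat} {k : Int} (hk : k = (K : Int)) :
    ∀ (eN : Nat) (e : Int), e.toNat = eN → ∀ (X R : PMat) (F G : AMat),
      PRelM K X F → PRelM K R G → PRelM K (pvMatPowGo k X e R) (G * F ^ eN) := by
  intro eN
  induction eN using Nat.strong_induction_on with
  | _ eN ih =>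
    intro e he X R F G hX hR
    by_cases h0 : 0 < e
    · rw [pvMatPowGo, dif_pos h0]
      show PRelM K (pvMatPowGo k (pvMatMul k X X) (e / 2)
        (if e % 2 = 1 then pvMatMul k R X else R)) (G * F ^ eN)
      have hXX : PRelM K (pvMatMul k X X) (F * F) := matmul_rel hk hX hX
      have hR' : PRelM K (if e % 2 = 1 then pvMatMul k R X else R)
          (if e % 2 = 1 then G * F else G) := by
        split_ifs
        · exact matmul_rel hk hR hX
        · exact hR
      have hdiv : (e / 2).toNat < eN := by omega
      have hres := ih (e / 2).toNat hdiv (e / 2) rfl _ _ (F * F)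
        (if e % 2 = 1 then G * F else G) hXX hR'
      have halg : (if e % 2 = 1 then G * F else G) * (F * F) ^ (e / 2).toNat = G * F ^ eN := by
        split_ifs with hpar
        · have heN : eN = 2 * (e / 2).toNat + 1 := by omega
          rw [heN, mul_assoc]
          congr 1
          rw [← pow_two, ← pow_mul, ← pow_succ']
        · have heN : eN = 2 * (e / 2).toNat := by
            have hm : e % 2 = 0 := by omega
            omega
          rw [heN, ← pow_two, ← pow_mul]
      rw [halg] at hres
      exact hres
    · rw [pvMatPowGo, dif_neg h0]
      have heN : eN = 0 := by omega
      rw [heN, pow_zero, mul_one]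
      exact hR

lemma shape_update (K : Nat) (M : PMat) (hlen : M.length = 8)
    (hent : ∀ i j : Nat, i < 8 → j < 8 → (pvMEntry M i j).length = K + 1)
    (nu cur : Nat) (hcur : cur < 8) (d : Nat) (x : Int) :
    (M.set nu ((M.getD nu []).set cur (((M.getD nu []).getD cur []).set d x))).length = 8 ∧
    ∀ i j : Nat, i < 8 → j < 8 →
      (pvMEntry (M.set nu ((M.getD nu []).set cur
        (((M.getD nu []).getD cur []).set d x))) i j).length = K + 1 := by
  refine ⟨by simp [hlen], fun i j hi hj => ?_⟩
  simp only [pvMEntry, List.getD_eq_getElem?_getD]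
  by_cases hnu : nu < M.length
  · by_cases hni : nu = i
    · subst hni
      rw [List.getElem?_set_self hnu]
      simp only [Option.getD_some]
      by_cases hcj : cur = j
      · subst hcj
        have hrow : ((M.getD nu []).getD cur []).length = K + 1 := hent nu cur (by omega) hcur
        have hcl : cur < (M.getD nu []).length := by
          by_contra hge
          push Not at hge
          have hnil : (M.getD nu []).getD cur [] = [] := by
            rw [List.getD_eq_getElem?_getD, List.getElem?_eq_none (by omega)]
            rfl
          rw [hnil] at hrow
          simp at hrow
        rw [List.getD_eq_getElem?_getD] at *
        rw [List.getElem?_set_self hcl]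
        simp only [Option.getD_some, List.length_set]
        have h2 := hent nu cur (by omega) hcur
        rw [pvMEntry, List.getD_eq_getElem?_getD, List.getD_eq_getElem?_getD] at h2
        exact h2
      · rw [List.getElem?_set_ne hcj]
        have h2 := hent nu j (by omega) hj
        rw [pvMEntry, List.getD_eq_getElem?_getD, List.getD_eq_getElem?_getD] at h2
        exact h2
    · rw [List.getElem?_set_ne hni]
      have h2 := hent i j hi hj
      rw [pvMEntry, List.getD_eq_getElem?_getD, List.getD_eq_getElem?_getD] at h2
      exact h2
  · rw [List.set_eq_of_length_le (by omega)]
    have h2 := hent i j hi hj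
    rw [pvMEntry, List.getD_eq_getElem?_getD, List.getD_eq_getElem?_getD] at h2
    exact h2

lemma buildM_len {K : Nat} {k : Int} (hk : k = (K : Int)) :
    (pvBuildM k).length = 8 ∧
    ∀ i j : Nat, i < 8 → j < 8 → (pvMEntry (pvBuildM k) i j).length = K + 1 := by
  have hK1 : (k+1).toNat = K + 1 := by omega
  have init : (List.replicate 8 (List.replicate 8 (List.replicate (k+1).toNat (0:Int)))).length = 8 ∧
      ∀ i j : Nat, i < 8 → j < 8 →
        (pvMEntry (List.replicate 8 (List.replicate 8 (List.replicate (k+1).toNat (0:Int)))) i j).length = K + 1 := by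
    refine ⟨by simp, fun i j hi hj => ?_⟩
    rw [pvMEntry, List.getD_replicate _ hi, List.getD_replicate _ hj, List.length_replicate, hK1]
  rw [pvBuildM]
  refine List.foldlRecOn (motive := fun (M : PMat) => M.length = 8 ∧
    ∀ i j : Nat, i < 8 → j < 8 → (pvMEntry M i j).length = K + 1) _ _ init ?_
  intro M hM cur hcur
  have hcur8 : cur < 8 := List.mem_range.mp hcur
  refine List.foldlRecOn (motive := fun (M : PMat) => M.length = 8 ∧
    ∀ i j : Nat, i < 8 → j < 8 → (pvMEntry M i j).length = K + 1) _ _ hM ?_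
  intro M' hM' mask _
  dsimp only []
  split_ifs with h1 h2
  · exact hM'
  · exact hM'
  · exact shape_update K M' hM'.1 hM'.2 _ cur hcur8 _ _

lemma buildM_rel {K : Nat} {k : Int} (hk : k = (K : Int)) :
    PRelM K (pvBuildM k)
      (Matrix.of fun i j : Fin 8 => PowerSeries.mk fun d =>
        if d ≤ K then castD (pvMEntry (pvBuildM k) i.val j.val) d else 0) := by
  intro i j
  refine ⟨(buildM_len hk).2 i.val j.val i.isLt j.isLt, fun d hd => ?_⟩
  simp only [Matrix.of_apply, PowerSeries.coeff_mk]
  rw [if_pos hd]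

noncomputable def e0v : Fin 8 → PS := fun i => if i = 0 then 1 else 0

lemma mulVec_sum (A : AMat) (v : Fin 8 → PS) (i : Fin 8) :
    A.mulVec v i = ∑ t : Fin 8, A i t * v t := by
  simp [Matrix.mulVec, dotProduct]

lemma mulVec_basis (A : AMat) (i : Fin 8) : A.mulVec e0v i = A i 0 := by
  rw [mulVec_sum]
  simp [e0v]

-- B-side: the functional polynomial operations respect the coefficient semantics
lemma polyadd_capprox {K : Nat} {a b : List Int} {φ ψ : Nat → Zm}
    (ha : CApprox K a φ) (hb : CApprox K b ψ) :
    CApprox K (pvPolyAdd a b) (fun d => φ d + ψ d) := by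
  obtain ⟨hla, hca⟩ := ha
  obtain ⟨hlb, hcb⟩ := hb
  refine ⟨by simp [pvPolyAdd, hla, hlb], fun d hd => ?_⟩
  have hda : d < a.length := by omega
  have hdb : d < b.length := by omega
  have hlen : d < (pvPolyAdd a b).length := by simp [pvPolyAdd, hla, hlb]; omega
  simp only [castD, List.getD_eq_getElem?_getD, List.getElem?_eq_getElem hlen, Option.getD_some]
  simp only [pvPolyAdd, List.getElem_zipWith]
  rw [cast_pymod]
  push_cast
  have ea := hca d hd
  have eb := hcb d hd
  simp only [castD, List.getD_eq_getElem?_getD, List.getElem?_eq_getElem hda,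
    List.getElem?_eq_getElem hdb, Option.getD_some] at ea eb
  rw [ea, eb]

lemma capprox_map_mod {K : Nat} {out : List Int} {φ : Nat → Zm} (h : CApprox K out φ) :
    CApprox K (out.map (fun x => PySem.Int.mod x 998244353)) φ := by
  obtain ⟨hlen, hco⟩ := h
  refine ⟨by simp [hlen], fun d hd => ?_⟩
  have hdl : d < out.length := by omega
  have hdl' : d < (out.map (fun x => PySem.Int.mod x 998244353)).length := by simp; omega
  simp only [castD, List.getD_eq_getElem?_getD, List.getElem?_eq_getElem hdl', Option.getD_some,
    List.getElem_map]
  rw [cast_pymod]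
  have := hco d hd
  simp only [castD, List.getD_eq_getElem?_getD, List.getElem?_eq_getElem hdl,
    Option.getD_some] at this
  exact this

lemma slice_step {K : Nat} {out : List Int} {φ : Nat → Zm} (h : CApprox K out φ)
    (i : Nat) (hi : i ≤ K) (v : Int) (b : List Int) (hb : b.length = K + 1) :
    CApprox K (out.take i ++ List.zipWith (fun x y => x + v * y) (out.drop i) b)
      (fun d => if i ≤ d then φ d + v * castD b (d - i) else φ d) := by
  obtain ⟨hlen, hco⟩ := h
  have hlt : (out.take i ++ List.zipWith (fun x y => x + v * y) (out.drop i) b).length = K + 1 := by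
    simp only [List.length_append, List.length_take, List.length_zipWith, List.length_drop,
      hlen, hb]
    omega
  refine ⟨hlt, fun d hd => ?_⟩
  have hdl : d < (out.take i ++ List.zipWith (fun x y => x + v * y) (out.drop i) b).length := by
    omega
  simp only [castD, List.getD_eq_getElem?_getD, List.getElem?_eq_getElem hdl, Option.getD_some]
  by_cases hdi : d < i
  · rw [if_neg (by omega)]
    have h1 : d < (out.take i).length := by simp [hlen]; omega
    rw [List.getElem_append_left h1, List.getElem_take]
    have := hco d hd
    have hdo : d < out.length := by omega
    simp only [castD, List.getD_eq_getElem?_getD, List.getElem?_eq_getElem hdo,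
      Option.getD_some] at this
    exact this
  · rw [if_pos (by omega)]
    have h1 : ¬ d < (out.take i).length := by simp [hlen]; omega
    rw [List.getElem_append_right (by omega)]
    have htl : (out.take i).length = i := by simp [hlen]; omega
    have hz : d - (out.take i).length = d - i := by rw [htl]
    have hzi : d - (out.take i).length < (List.zipWith (fun x y => x + v * y) (out.drop i) b).length := by
      simp only [List.length_zipWith, List.length_drop, hlen, hb, htl]
      omega
    rw [List.getElem_zipWith]
    have hdrop : (out.drop i)[d - (out.take i).length]'(by
        simp only [List.length_drop, hlen, htl]; omega) = out[d]'(by omega) := by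
      rw [List.getElem_drop]
      congr 1
      omega
    rw [hdrop]
    push_cast
    have e1 := hco d hd
    have hdo : d < out.length := by omega
    simp only [castD, List.getD_eq_getElem?_getD, List.getElem?_eq_getElem hdo,
      Option.getD_some] at e1
    rw [e1]
    have hbd : d - (out.take i).length < b.length := by omega
    have e2 : ((b[d - (out.take i).length]'hbd : Int) : Zm) = castD b (d - i) := by
      simp only [castD, List.getD_eq_getElem?_getD, htl]
      rw [List.getElem?_eq_getElem (by omega : d - i < b.length)]
      rfl
    rw [e2]
    simp only [castD, List.getD_eq_getElem?_getD]

lemma polymul_fold {K : Nat} (a b : List Int) (hb : b.length = K + 1) :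
    ∀ m, m ≤ K + 1 → ∀ (out : List Int) (φ : Nat → Zm), CApprox K out φ →
    CApprox K ((List.range m).foldl (fun out i =>
        if a.getD i 0 ≠ 0 then
          out.take i ++ List.zipWith (fun x y => x + a.getD i 0 * y) (out.drop i) b
        else out) out)
      (fun d => φ d + ∑ i ∈ Finset.range (min m (d+1)), castD a i * castD b (d - i)) := by
  intro m
  induction m with
  | zero =>
    intro hm out φ hout
    simp only [List.range_zero, List.foldl_nil]
    exact capprox_congr hout (fun d hd => by simp)
  | succ m ih =>
    intro hm out φ hout
    rw [List.range_succ, List.foldl_append, List.foldl_cons, List.foldl_nil]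
    have h1 := ih (by omega) out φ hout
    by_cases hva : a.getD m 0 = 0
    · rw [hva]
      simp only [ne_eq, not_true_eq_false, if_false]
      refine capprox_congr h1 (fun d hd => ?_)
      by_cases hmd : m ≤ d
      · have e1 : min m (d+1) = m := by omega
        have e2 : min (m+1) (d+1) = m + 1 := by omega
        rw [e1, e2, Finset.sum_range_succ]
        have : castD a m = 0 := by
          unfold castD
          rw [hva]
          exact Int.cast_zero
        rw [this, zero_mul, add_zero]
      · have : min (m+1) (d+1) = min m (d+1) := by omega
        rw [this]
    · rw [if_pos hva]
      have h2 := slice_step h1 m (by omega) (a.getD m 0) b hb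
      refine capprox_congr h2 (fun d hd => ?_)
      by_cases hmd : m ≤ d
      · rw [if_pos hmd]
        have e1 : min m (d+1) = m := by omega
        have e2 : min (m+1) (d+1) = m + 1 := by omega
        rw [e1, e2, Finset.sum_range_succ]
        simp only [castD]
        ring
      · rw [if_neg hmd]
        have : min (m+1) (d+1) = min m (d+1) := by omega
        rw [this]

lemma polymul_rel {K : Nat} {k : Int} (hk : k = (K : Int)) {a b : List Int} {f g : PS}
    (ha : PRel K a f) (hb : PRel K b g) : PRel K (pvPolyMul k a b) (f * g) := by
  have hK1 : (k+1).toNat = K + 1 := by omega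
  have h0 : CApprox K (List.replicate (k+1).toNat 0) (fun _ => 0) := by
    rw [hK1]; exact capprox_zero K
  have hfold := polymul_fold a b hb.1 a.length (by rw [ha.1]) _ _ h0
  rw [pvPolyMul]
  refine capprox_congr (capprox_map_mod hfold) (fun d hd => ?_)
  have e1 : min a.length (d+1) = d + 1 := by rw [ha.1]; omega
  rw [zero_add, e1, PowerSeries.coeff_mul, Finset.Nat.sum_antidiagonal_eq_sum_range_succ_mk]
  apply Finset.sum_congr rfl
  intro i hi
  simp only [Finset.mem_range] at hi
  rw [ha.2 i (by omega), hb.2 (d - i) (by omega)]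

lemma fold_addmul_rel {K : Nat} {k : Int} (hk : k = (K : Int))
    (ent wv : Fin 8 → List Int) (fent wf : Fin 8 → PS)
    (hent : ∀ t, PRel K (ent t) (fent t)) (hw : ∀ t, PRel K (wv t) (wf t)) :
    ∀ (l : List (Fin 8)) (acc : List Int) (φ : Nat → Zm), CApprox K acc φ →
    CApprox K (l.foldl (fun acc t => pvPolyAdd acc (pvPolyMul k (ent t) (wv t))) acc)
      (fun d => φ d + ((l.map (fun t => PowerSeries.coeff (R := Zm) d (fent t * wf t))).sum)) := by
  intro l
  induction l with
  | nil => intro acc φ hacc; exact capprox_congr hacc (fun d hd => by simp)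
  | cons t l ih =>
    intro acc φ hacc
    rw [List.foldl_cons]
    have h1 := polyadd_capprox hacc (polymul_rel hk (hent t) (hw t))
    have h2 := ih _ _ h1
    refine capprox_congr h2 (fun d hd => ?_)
    simp only [List.map_cons, List.sum_cons]
    ring

lemma matsqB_rel {K : Nat} {k : Int} (hk : k = (K : Int)) {X : PMat} {F : AMat}
    (hX : PRelM K X F) : PRelM K (pvMatSqB k X) (F * F) := by
  have hK1 : (k+1).toNat = K + 1 := by omega
  intro i j
  have hrange : List.range 8 = (List.finRange 8).map Fin.val := by decide
  have hentry : pvMEntry (pvMatSqB k X) i.val j.val =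
      (List.finRange 8).foldl (fun acc t => pvPolyAdd acc (pvPolyMul k (pvMEntry X i.val t.val) (pvMEntry X t.val j.val)))
        (List.replicate (k+1).toNat 0) := by
    rw [pvMatSqB]
    unfold pvMEntry
    rw [PySem.List.getD_map_range _ 8 i.val _ i.isLt, PySem.List.getD_map_range _ 8 j.val _ j.isLt]
    rw [hrange, List.foldl_map]
  rw [hentry]
  have h0 : CApprox K (List.replicate (k+1).toNat 0) (fun _ => 0) := by
    rw [hK1]; exact capprox_zero K
  have := fold_addmul_rel hk (fun t => pvMEntry X i.val t.val) (fun t => pvMEntry X t.val j.val)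
    (fun t => F i t) (fun t => F t j) (fun t => hX i t) (fun t => hX t j) (List.finRange 8) _ _ h0
  refine capprox_congr this (fun d hd => ?_)
  rw [zero_add, ← Fin.sum_univ_def, Matrix.mul_apply, map_sum]

lemma vecapply_rel {K : Nat} {k : Int} (hk : k = (K : Int)) {X : PMat} {F : AMat}
    (hX : PRelM K X F) {w : List (List Int)} {v : Fin 8 → PS} (hw : PRelV K w v) :
    PRelV K (pvVecApply k X w) (F.mulVec v) := by
  have hK1 : (k+1).toNat = K + 1 := by omega
  intro i
  have hrange : List.range 8 = (List.finRange 8).map Fin.val := by decide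
  have hentry : (pvVecApply k X w).getD i.val [] =
      (List.finRange 8).foldl (fun acc t => pvPolyAdd acc (pvPolyMul k (pvMEntry X i.val t.val) (w.getD t.val [])))
        (List.replicate (k+1).toNat 0) := by
    rw [pvVecApply, PySem.List.getD_map_range _ 8 i.val _ i.isLt]
    rw [hrange, List.foldl_map]
  rw [hentry]
  have h0 : CApprox K (List.replicate (k+1).toNat 0) (fun _ => 0) := by
    rw [hK1]; exact capprox_zero K
  have := fold_addmul_rel hk (fun t => pvMEntry X i.val t.val) (fun t => w.getD t.val [])
    (fun t => F i t) (fun t => v t) (fun t => hX i t) (fun t => hw t) (List.finRange 8) _ _ h0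
  refine capprox_congr this (fun d hd => ?_)
  rw [zero_add, ← Fin.sum_univ_def, mulVec_sum, map_sum]

lemma applypow_rel {K : Nat} {k : Int} (hk : k = (K : Int)) :
    ∀ (eN : Nat) (e : Int), e.toNat = eN → ∀ (X : PMat) (w : List (List Int))
      (F : AMat) (v : Fin 8 → PS), PRelM K X F → PRelV K w v →
      PRelV K (pvApplyPow k X e w) ((F ^ eN).mulVec v) := by
  intro eN
  induction eN using Nat.strong_induction_on with
  | _ eN ih =>
    intro e he X w F v hX hw
    by_cases h0 : 0 < e
    · rw [pvApplyPow, dif_pos h0]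
      show PRelV K (pvApplyPow k (pvMatSqB k X) (e / 2)
        (if e % 2 = 1 then pvVecApply k X w else w)) ((F ^ eN).mulVec v)
      have hXX : PRelM K (pvMatSqB k X) (F * F) := matsqB_rel hk hX
      have hw' : PRelV K (if e % 2 = 1 then pvVecApply k X w else w)
          (if e % 2 = 1 then F.mulVec v else v) := by
        split_ifs
        · exact vecapply_rel hk hX hw
        · exact hw
      have hdiv : (e / 2).toNat < eN := by omega
      have hres := ih (e / 2).toNat hdiv (e / 2) rfl _ _ (F * F)
        (if e % 2 = 1 then F.mulVec v else v) hXX hw'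
      have halg : ((F * F) ^ (e / 2).toNat).mulVec (if e % 2 = 1 then F.mulVec v else v) =
          (F ^ eN).mulVec v := by
        split_ifs with hpar
        · have heN : eN = 2 * (e / 2).toNat + 1 := by omega
          rw [heN, Matrix.mulVec_mulVec, ← pow_two, ← pow_mul, ← pow_succ]
        · have heN : eN = 2 * (e / 2).toNat := by
            have hm : e % 2 = 0 := by omega
            omega
          rw [heN, ← pow_two, ← pow_mul]
      rw [halg] at hres
      exact hres
    · rw [pvApplyPow, dif_neg h0]
      have heN : eN = 0 := by omega
      rw [heN, pow_zero, Matrix.one_mulVec]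
      exact hw

lemma g0B_rel {K : Nat} {k : Int} (hk : k = (K : Int)) :
    PRelV K ((List.range 8).map (fun i =>
        (List.range (k+1).toNat).map (fun d => if i = 0 ∧ d = 0 then (1 : Int) else 0)))
      e0v := by
  have hK1 : (k+1).toNat = K + 1 := by omega
  intro i
  have hrow : ((List.range 8).map (fun i =>
      (List.range (k+1).toNat).map (fun d => if i = 0 ∧ d = 0 then (1 : Int) else 0))).getD i.val [] =
      (List.range (k+1).toNat).map (fun d => if i.val = 0 ∧ d = 0 then (1 : Int) else 0) := by
    rw [PySem.List.getD_map_range _ 8 i.val _ i.isLt]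
  rw [hrow]
  refine ⟨by simp [hK1], fun d hd => ?_⟩
  have hdl : d < ((List.range (k+1).toNat).map (fun d => if i.val = 0 ∧ d = 0 then (1 : Int) else 0)).length := by
    simp [hK1]; omega
  simp only [castD, List.getD_eq_getElem?_getD, List.getElem?_eq_getElem hdl, Option.getD_some,
    List.getElem_map, List.getElem_range]
  simp only [e0v]
  by_cases hi : i = 0
  · have hi' : i.val = 0 := by rw [hi]; rfl
    rw [if_pos hi]
    rcases d with _ | d
    · simp [hi']
    · simp [hi', PowerSeries.coeff_one]
  · have hi' : ¬ i.val = 0 := fun h => hi (Fin.ext h)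
    rw [if_neg hi]
    simp [hi']

lemma final_eq {K : Nat} {a b : List Int} {f : PS} (ha : PRel K a f) (hb : PRel K b f) :
    PySem.Int.mod (a.drop 1).sum 998244353 = PySem.Int.mod (b.drop 1).sum 998244353 := by
  apply pymod_congr
  rw [Int.cast_list_sum, Int.cast_list_sum]
  obtain ⟨hla, hca⟩ := ha
  obtain ⟨hlb, hcb⟩ := hb
  congr 1
  apply List.ext_getElem
  · simp [hla, hlb]
  · intro i h1 h2
    simp only [List.getElem_map, List.getElem_drop]
    have hia : 1 + i < a.length := by simp [List.length_map] at h1; omega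
    have hib : 1 + i < b.length := by simp [List.length_map] at h2; omega
    have hiK : 1 + i ≤ K := by omega
    have ea := hca (1+i) hiK
    have eb := hcb (1+i) hiK
    simp only [castD, List.getD_eq_getElem?_getD, List.getElem?_eq_getElem hia,
      List.getElem?_eq_getElem hib, Option.getD_some] at ea eb
    rw [ea, eb]

-- ===== VERDICT (by name: the statement is the Claim_ definition above) =====
theorem ways_to_repair_spec : Claim_equal_ways_to_repair := by
  intro n k hdom hpre
  obtain ⟨hn, hk0⟩ := hpre
  unfold Spec_ways_to_repair
  have hk : k = (k.toNat : Int) := by omega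
  set K := k.toNat with hKdef
  have hM := buildM_rel (K := K) hk
  set F : AMat := Matrix.of (fun i j : Fin 8 => PowerSeries.mk fun d =>
    if d ≤ K then castD (pvMEntry (pvBuildM k) i.val j.val) d else 0) with hFdef
  have hA : PRelM K (pvMatPowGo k (pvBuildM k) n (pvIdMat k)) ((1 : AMat) * F ^ n.toNat) :=
    matpow_rel hk n.toNat n rfl _ _ F 1 hM (idmat_rel hk)
  rw [one_mul] at hA
  have hB' := applypow_rel hk n.toNat n rfl (pvBuildM k) _ F e0v hM (g0B_rel hk)
  have hB : ∀ i : Fin 8, PRel K ((pvApplyPow k (pvBuildM k) n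
      ((List.range 8).map (fun i =>
        (List.range (k+1).toNat).map (fun d => if i = 0 ∧ d = 0 then (1 : Int) else 0)))).getD i.val [])
      ((F ^ n.toNat) i 0) := by
    intro i
    have h := hB' i
    rwa [mulVec_basis] at h
  unfold ways_to_repair ways_to_repair_alt
  dsimp only
  by_cases hkz : k = 0
  · rw [if_pos hkz]
    have hlen := (hB 0).1
    have hK0 : K = 0 := by omega
    have hdrop : ((pvApplyPow k (pvBuildM k) n
        ((List.range 8).map (fun i =>
          (List.range (k+1).toNat).map (fun d => if i = 0 ∧ d = 0 then (1 : Int) else 0)))).getD (0:Fin 8).val []).drop 1 = [] := by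
      apply List.drop_eq_nil_of_le
      rw [hlen, hK0]
    simp only [Fin.val_zero] at hdrop
    rw [hdrop]
    rfl
  · rw [if_neg hkz]
    exact final_eq (hA 0 0) (hB 0)
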